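-- pv_equiv track=rewrite | github.com/zferic/loopdata | gendataz/gendata.py | extract_between_init_and_newline
-- ===== SOURCE A (Python) =====
-- def extract_between_init_and_newline(list_of_lists):
--     start_extraction = False
--     extracted_items = []
--     for sublist in list_of_lists:
--         if start_extraction:
--             if sublist == ['\n']:
--                 break
--             extracted_items.append(sublist)
--         if any('<looptarget>' in item for item in sublist):
--             start_extraction = True
--     temp = ''
--     for x in extracted_items:
--         temp += ''.join(x)
--     return temp
-- ===== SOURCE B (Python) =====
-- def extract_between_init_and_newline(list_of_lists):
--     start = next((i for i, s in enumerate(list_of_lists)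
--                   if any('<looptarget>' in item for item in s)), None)
--     if start is None:
--         return ''
--     tail = list_of_lists[start + 1:]
--     try:
--         end = tail.index(['\n'])
--     except ValueError:
--         end = len(tail)
--     return ''.join(item for s in tail[:end] for item in s)
-- ===== Notes on version B (the rewrite author's own statement) =====
-- stated objective: simpler
-- what changed: Replaces the flag-driven single pass (mutable start_extraction flag plus accumulator list plus a second concatenation loop) by a locate-then-collect shape: find the index of the first marker sublist, slice the tail after it, cut at the first ['\n'], and flatten-join in one expression.
import Mathlib
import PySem

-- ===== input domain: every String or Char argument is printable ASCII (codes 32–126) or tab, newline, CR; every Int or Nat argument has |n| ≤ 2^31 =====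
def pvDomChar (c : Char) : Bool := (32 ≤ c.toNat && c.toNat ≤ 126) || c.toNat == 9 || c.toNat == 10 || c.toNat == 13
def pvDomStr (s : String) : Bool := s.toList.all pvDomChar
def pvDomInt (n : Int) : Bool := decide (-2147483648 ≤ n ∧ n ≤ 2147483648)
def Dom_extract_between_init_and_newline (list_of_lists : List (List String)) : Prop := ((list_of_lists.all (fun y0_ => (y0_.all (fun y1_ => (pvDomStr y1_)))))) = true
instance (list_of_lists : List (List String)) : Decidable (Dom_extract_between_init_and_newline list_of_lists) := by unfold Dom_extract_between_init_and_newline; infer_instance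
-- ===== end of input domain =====

-- B replaces A's flag-driven single pass by locate-the-marker, slice the tail, cut at ['\n'], flatten-join (objective: simpler).

-- ===== PORT A =====
-- any('<looptarget>' in item for item in sublist)
def pvHasMarker (s : List String) : Bool := s.any (fun item => PySem.Str.isIn "<looptarget>" item)

-- the for-loop of A: state = (start_extraction, extracted_items); break returns the accumulator
def pvLoopA : List (List String) → Bool → List (List String) → List (List String)
  | [], _, acc => acc
  | s :: rest, start, acc =>
    if start then
      if s = ["\n"] then acc
      else pvLoopA rest (if pvHasMarker s then true else start) (acc ++ [s])
    else pvLoopA rest (if pvHasMarker s then true else start) acc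

def extract_between_init_and_newline (list_of_lists : List (List String)) : String :=
  (pvLoopA list_of_lists false []).foldl (fun temp x => temp ++ PySem.Str.join "" x) ""

-- ===== PORT B =====
def pvHasMarkerB (s : List String) : Bool := s.any (fun item => PySem.Str.isIn "<looptarget>" item)

def extract_between_init_and_newline_alt (list_of_lists : List (List String)) : String :=
  match List.findIdx? pvHasMarkerB list_of_lists with
  | none => ""
  | some i =>
    let tail := PySem.List.slice list_of_lists (some ((i : Int) + 1)) none
    let e : Nat := match PySem.List.index? tail ["\n"] with
      | some j => j
      | none => tail.length
    PySem.Str.join "" ((PySem.List.slice tail none (some (e : Int))).flatMap id)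

-- ===== PRECONDITION & SPEC =====
def Spec_extract_between_init_and_newline (list_of_lists : List (List String)) (out : String) : Prop := out = extract_between_init_and_newline_alt list_of_lists
instance (list_of_lists : List (List String)) (out : String) : Decidable (Spec_extract_between_init_and_newline list_of_lists out) := by unfold Spec_extract_between_init_and_newline; infer_instance

-- ===== CLAIM (what is proved, stated in full; the proofs are below) =====
def Claim_equal_extract_between_init_and_newline : Prop := ∀ (list_of_lists : List (List String)), Dom_extract_between_init_and_newline list_of_lists → Spec_extract_between_init_and_newline list_of_lists (extract_between_init_and_newline list_of_lists)

-- ===== LEMMAS AND PROOFS =====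

theorem pvHasMarkerB_eq : pvHasMarkerB = pvHasMarker := rfl

-- after the marker: the loop collects up to (excl.) the first ['\n']
theorem pvLoopA_true (l : List (List String)) : ∀ acc,
    pvLoopA l true acc = acc ++ l.take ((List.idxOf? ["\n"] l).getD l.length) := by
  induction l with
  | nil => intro acc; simp [pvLoopA]
  | cons s rest ih =>
    intro acc
    by_cases hs : s = ["\n"]
    · subst hs
      simp [pvLoopA, List.idxOf?_cons]
    · have hb : (s == ["\n"]) = false := beq_eq_false_iff_ne.mpr hs
      simp only [pvLoopA, if_neg hs, List.idxOf?_cons, hb, Bool.false_eq_true,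
        if_false]
      have ht : (if pvHasMarker s then true else true) = true := by
        cases pvHasMarker s <;> rfl
      rw [ht, ih]
      cases h : List.idxOf? ["\n"] rest <;> simp

-- before the marker: the loop skips until findIdx? fires
theorem pvLoopA_false (l : List (List String)) : ∀ acc,
    pvLoopA l false acc =
      match List.findIdx? pvHasMarker l with
      | none => acc
      | some i =>
        let tail := l.drop (i + 1)
        acc ++ tail.take ((List.idxOf? ["\n"] tail).getD tail.length) := by
  induction l with
  | nil => intro acc; simp [pvLoopA]
  | cons s rest ih =>
    intro acc
    simp only [pvLoopA, Bool.false_eq_true, if_false]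
    by_cases hm : pvHasMarker s = true
    · rw [if_pos hm, pvLoopA_true]
      simp [List.findIdx?_cons, hm]

    · rw [if_neg hm, ih]
      rw [List.findIdx?_cons]
      simp only [hm, Bool.false_eq_true, if_false]
      cases h : List.findIdx? pvHasMarker rest <;> simp

-- concatenating the joins = joining the flattening
theorem pvIntersperse_nil_flatten (a : List (List Char)) :
    (List.intersperse [] a).flatten = a.flatten := by
  induction a with
  | nil => rfl
  | cons x xs ih => cases xs <;> simp_all [List.intersperse]

theorem pvJoin_append (a b : List String) :
    PySem.Str.join "" (a ++ b) = PySem.Str.join "" a ++ PySem.Str.join "" b := by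
  simp [PySem.Str.join, PySem.Chars.join, List.intercalate, pvIntersperse_nil_flatten,
    ← String.ofList_append]

theorem pvFoldl_join (xs : List (List String)) : ∀ (t : String),
    xs.foldl (fun temp x => temp ++ PySem.Str.join "" x) t =
      t ++ PySem.Str.join "" (xs.flatMap id) := by
  induction xs with
  | nil =>
    intro t
    simp [PySem.Str.join, PySem.Chars.join, List.intercalate]
  | cons s rest ih =>
    intro t
    have hf : (s :: rest).flatMap id = s ++ rest.flatMap id := by simp
    rw [List.foldl_cons, ih, hf, pvJoin_append, String.append_assoc]

-- ===== VERDICT (by name: the statement is the Claim_ definition above) =====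
theorem extract_between_init_and_newline_spec : Claim_equal_extract_between_init_and_newline := by
  intro l _
  unfold Spec_extract_between_init_and_newline extract_between_init_and_newline extract_between_init_and_newline_alt
  rw [pvHasMarkerB_eq, pvLoopA_false]
  cases h : List.findIdx? pvHasMarker l with
  | none => simp [PySem.Str.join, PySem.Chars.join, List.intercalate]
  | some i =>
    have hslice : PySem.List.slice l (some ((i : Int) + 1)) none = l.drop (i + 1) := by
      have := PySem.List.slice_from l (a := (i : Int) + 1) (by positivity)
      simpa using this
    simp only [hslice, PySem.List.index?_eq_idxOf?]
    rw [pvFoldl_join, String.empty_append]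
    congr 1
    cases hj : List.idxOf? ["\n"] (l.drop (i + 1)) with
    | none =>
      simp
    | some j =>
      simp [PySem.List.slice_to _ (b := (j : Int)) (by positivity)]
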